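-- pv_equiv track=rewrite | github.com/CertifiedJoon/LeetCode | isomorphic.py | isIsomorphicWords
-- ===== SOURCE A (Python) =====
-- def isIsomorphicWords(words):
--     """
--     Extension to above problem.
--     Same problem but with a group of strings instead of two.
--     """
--     #First Occurence Trasformation.
--     transformed = set() # stores all transformed strings as a set
--     for word in words:
--         first_seen = {} # maps character to the index at which the char was seen for the first time
--         occurence = [0] * len(word) # transformed version of each word
--         for i, c in enumerate(word):
--             if c not in first_seen:
--                 first_seen[c] = i
--             occurence[i] = str(first_seen[c])
--         transformed.add(' '.join(occurence))
--     return len(transformed) <= 1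
-- ===== SOURCE B (Python) =====
-- def isIsomorphicWords(words):
--     """Pairwise check against the first word: two words match iff they have equal
--     length and the first-occurrence index of each aligned character pair agrees."""
--     if len(words) < 2:
--         return True
--     ref = words[0]
--
--     def ok(u, w):
--         return len(u) == len(w) and all(u.index(a) == w.index(b) for a, b in zip(u, w))
--
--     return all(ok(ref, w) for w in words[1:])
-- ===== Notes on version B (the rewrite author's own statement) =====
-- stated objective: alternative
-- what changed: A canonicalizes every word into a first-occurrence pattern string and counts distinct patterns in a set; B instead compares each word directly against the first word with early exit, checking equal length and agreement of the first-occurrence index (str.index) of every aligned character pair, building no pattern strings and no set.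
import Mathlib
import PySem

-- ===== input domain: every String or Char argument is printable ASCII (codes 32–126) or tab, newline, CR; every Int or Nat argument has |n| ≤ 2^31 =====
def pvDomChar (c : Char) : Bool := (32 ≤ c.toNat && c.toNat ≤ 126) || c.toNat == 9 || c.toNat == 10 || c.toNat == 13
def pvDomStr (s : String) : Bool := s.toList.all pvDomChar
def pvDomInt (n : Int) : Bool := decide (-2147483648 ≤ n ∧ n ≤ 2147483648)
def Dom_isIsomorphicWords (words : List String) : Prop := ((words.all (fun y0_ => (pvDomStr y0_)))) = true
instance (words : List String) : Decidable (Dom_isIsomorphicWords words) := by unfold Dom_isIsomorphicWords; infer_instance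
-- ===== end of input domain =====

-- B replaces A's set-of-canonical-pattern-strings construction by direct pairwise
-- first-occurrence-index comparison against the first word (objective: alternative).

-- ===== PORT A =====
-- loop body: 'if c not in first_seen: first_seen[c] = i' then 'occurence[i] = str(first_seen[c])'
-- (that lookup always succeeds, so it is ported as getD)
def pvStepA (st : PySem.Dict Char Int × List String) (ic : Int × Char) :
    PySem.Dict Char Int × List String :=
  let fs := if st.1.contains ic.2 then st.1 else st.1.insert ic.2 ic.1
  (fs, PySem.List.pySetD st.2 ic.1 (PySem.Int.toStr (fs.getD ic.2 0)))

-- one iteration of A's outer loop, producing ' '.join(occurence).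
-- Python's 'occurence = [0]*len(word)' holds ints that are ALL overwritten (cell i at
-- step i, before the join reads any cell); the "" placeholder models those never-read ints.
def pvWordKey (word : String) : String :=
  let cs := word.toList
  PySem.Str.join " "
    (((PySem.List.enumerate cs).foldl pvStepA (PySem.Dict.empty, List.replicate cs.length "")).2)

def isIsomorphicWords (words : List String) : Bool :=
  let transformed : PySem.Set String :=
    words.foldl (fun s word => PySem.Set.add s (pvWordKey word)) PySem.Set.empty
  decide (PySem.Set.len transformed ≤ 1)

-- ===== PORT B =====
-- len(u) == len(w) and all(u.index(a) == w.index(b) for a, b in zip(u, w));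
-- u.index(a) never raises here (a is drawn from u itself), so it is ported as Chars.find.
def pvPairOk (u w : String) : Bool :=
  (PySem.Str.len u == PySem.Str.len w) &&
    (u.toList.zip w.toList).all
      (fun p => PySem.Chars.find u.toList [p.1] == PySem.Chars.find w.toList [p.2])

def isIsomorphicWords_alt (words : List String) : Bool :=
  if words.length < 2 then true
  else
    match words with
    | [] => true
    | ref :: rest => rest.all (fun w => pvPairOk ref w)

-- ===== PRECONDITION & SPEC =====
def Spec_isIsomorphicWords (words : List String) (out : Bool) : Prop := out = isIsomorphicWords_alt words
instance (words : List String) (out : Bool) : Decidable (Spec_isIsomorphicWords words out) := by unfold Spec_isIsomorphicWords; infer_instance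

-- ===== CLAIM (what is proved, stated in full; the proofs are below) =====
def Claim_equal_isIsomorphicWords : Prop := ∀ (words : List String), Dom_isIsomorphicWords words → Spec_isIsomorphicWords words (isIsomorphicWords words)

-- ===== LEMMAS AND PROOFS =====

-- first-occurrence index list of a word (both programs are proved to reduce to it)
def pvFs (cs : List Char) : List Nat := cs.map (fun c => cs.idxOf c)


theorem pv_toDigitsCore_append : ∀ (f n : Nat) (ds : List Char),
    Nat.toDigitsCore 10 f n ds = Nat.toDigitsCore 10 f n [] ++ ds := by
  intro f
  induction f with
  | zero => intro n ds; simp [Nat.toDigitsCore]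
  | succ f ih =>
    intro n ds
    simp only [Nat.toDigitsCore]
    by_cases h : n / 10 = 0
    · simp [h]
    · simp only [h, if_false]
      rw [ih (n/10) ((n % 10).digitChar :: ds), ih (n/10) [(n % 10).digitChar]]
      simp

theorem pv_digitChar_toNat (k : Nat) (h : k < 10) : (Nat.digitChar k).toNat = 48 + k := by
  interval_cases k <;> decide

def pvVal (ds : List Char) : Nat := ds.foldl (fun a c => 10 * a + (c.toNat - 48)) 0

theorem pv_val_core : ∀ (f n : Nat), n < f → pvVal (Nat.toDigitsCore 10 f n []) = n := by
  intro f
  induction f with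
  | zero => omega
  | succ f ih =>
    intro n hn
    simp only [Nat.toDigitsCore]
    by_cases h : n / 10 = 0
    · have h10 : n < 10 := by omega
      simp only [h, if_true, pvVal, List.foldl_cons, List.foldl_nil]
      rw [pv_digitChar_toNat (n % 10) (Nat.mod_lt n (by norm_num))]
      omega
    · simp only [h, if_false]
      rw [pv_toDigitsCore_append]
      have hlt : n / 10 < f := by
        have := Nat.div_lt_self (by omega : 0 < n) (by norm_num : 1 < 10)
        omega
      have hv := ih (n/10) hlt
      simp only [pvVal, List.foldl_append] at *
      rw [hv]
      have := pv_digitChar_toNat (n % 10) (Nat.mod_lt n (by norm_num))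
      simp [this]
      omega

theorem pv_val_toDigits (n : Nat) : pvVal (Nat.toDigits 10 n) = n :=
  pv_val_core (n+1) n (Nat.lt_succ_self n)

theorem pv_toDigits_inj {m n : Nat} (h : Nat.toDigits 10 m = Nat.toDigits 10 n) : m = n := by
  have := pv_val_toDigits m
  rw [h, pv_val_toDigits] at this
  omega

theorem pv_toDigits_ne_nil (n : Nat) : Nat.toDigits 10 n ≠ [] := by
  unfold Nat.toDigits
  simp only [Nat.toDigitsCore]
  by_cases h : n / 10 = 0
  · simp [h]
  · simp only [h, if_false]
    rw [pv_toDigitsCore_append]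
    simp

theorem pv_digit_mem : ∀ (f n : Nat) (c : Char), c ∈ Nat.toDigitsCore 10 f n [] →
    48 ≤ c.toNat ∧ c.toNat ≤ 57 := by
  intro f
  induction f with
  | zero => intro n c hc; simp [Nat.toDigitsCore] at hc
  | succ f ih =>
    intro n c hc
    have hd : (Nat.digitChar (n % 10)).toNat = 48 + n % 10 :=
      pv_digitChar_toNat _ (Nat.mod_lt n (by norm_num))
    have hm : n % 10 < 10 := Nat.mod_lt n (by norm_num)
    simp only [Nat.toDigitsCore] at hc
    by_cases h : n / 10 = 0
    · simp [h] at hc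
      subst hc; omega
    · simp only [h, if_false] at hc
      rw [pv_toDigitsCore_append] at hc
      rcases List.mem_append.mp hc with h1 | h1
      · exact ih _ _ h1
      · simp at h1; subst h1; omega

theorem pv_toDigits_no_space (n : Nat) : ' ' ∉ Nat.toDigits 10 n := by
  intro h
  have := pv_digit_mem (n+1) n ' ' h
  revert this; decide

theorem pv_toChars_natCast (n : Nat) : PySem.Int.toChars (n : Int) = Nat.toDigits 10 n := by
  simp [PySem.Int.toChars]


theorem pv_split_head : ∀ (x y a b : List Char), ' ' ∉ x → ' ' ∉ y →
    x ++ ' ' :: a = y ++ ' ' :: b → x = y ∧ a = b := by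
  intro x
  induction x with
  | nil =>
    intro y a b _ hy h
    cases y with
    | nil => simp_all
    | cons c y' =>
      simp only [List.nil_append, List.cons_append, List.cons.injEq] at h
      exact (hy (h.1 ▸ List.mem_cons_self)).elim
  | cons c x' ih =>
    intro y a b hx hy h
    cases y with
    | nil =>
      simp only [List.cons_append, List.nil_append, List.cons.injEq] at h
      exact (hx (h.1.symm ▸ List.mem_cons_self)).elim
    | cons d y' =>
      simp only [List.cons_append, List.cons.injEq] at h
      obtain ⟨hcd, h2⟩ := h
      have := ih y' a b (fun hm => hx (List.mem_cons_of_mem _ hm))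
        (fun hm => hy (List.mem_cons_of_mem _ hm)) h2
      exact ⟨by rw [hcd, this.1], this.2⟩

theorem pv_join_inj : ∀ (l1 l2 : List (List Char)),
    (∀ t ∈ l1, t ≠ [] ∧ ' ' ∉ t) → (∀ t ∈ l2, t ≠ [] ∧ ' ' ∉ t) →
    PySem.Chars.join [' '] l1 = PySem.Chars.join [' '] l2 → l1 = l2 := by
  intro l1
  induction l1 with
  | nil =>
    intro l2 _ h2 h
    cases l2 with
    | nil => rfl
    | cons t r =>
      exfalso
      cases r with
      | nil =>
        rw [PySem.Chars.join_nil, PySem.Chars.join_singleton] at h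
        exact (h2 t (by simp)).1 h.symm
      | cons t' r' =>
        rw [PySem.Chars.join_nil, PySem.Chars.join_cons_cons] at h
        have ht : t ≠ [] := (h2 t (by simp)).1
        cases t with
        | nil => exact ht rfl
        | cons c cs => simp at h
  | cons x r1 ih =>
    intro l2 h1 h2 h
    cases l2 with
    | nil =>
      exfalso
      cases r1 with
      | nil =>
        rw [PySem.Chars.join_nil, PySem.Chars.join_singleton] at h
        exact (h1 x (by simp)).1 h
      | cons t' r' =>
        rw [PySem.Chars.join_nil, PySem.Chars.join_cons_cons] at h
        have ht : x ≠ [] := (h1 x (by simp)).1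
        cases x with
        | nil => exact ht rfl
        | cons c cs => simp at h
    | cons y r2 =>
      cases r1 with
      | nil =>
        cases r2 with
        | nil =>
          rw [PySem.Chars.join_singleton, PySem.Chars.join_singleton] at h
          rw [h]
        | cons z r2' =>
          exfalso
          rw [PySem.Chars.join_singleton, PySem.Chars.join_cons_cons] at h
          have hx : ' ' ∉ x := (h1 x (by simp)).2
          rw [h] at hx
          simp at hx
      | cons w r1' =>
        cases r2 with
        | nil =>
          exfalso
          rw [PySem.Chars.join_singleton, PySem.Chars.join_cons_cons] at h
          have hy : ' ' ∉ y := (h2 y (by simp)).2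
          rw [← h] at hy
          simp at hy
        | cons z r2' =>
          rw [PySem.Chars.join_cons_cons, PySem.Chars.join_cons_cons] at h
          have h' : x ++ ' ' :: PySem.Chars.join [' '] (w :: r1')
              = y ++ ' ' :: PySem.Chars.join [' '] (z :: r2') := by
            simpa using h
          obtain ⟨hxy, hrest⟩ := pv_split_head _ _ _ _ (h1 x (by simp)).2 (h2 y (by simp)).2 h'
          have := ih (z :: r2') (fun t ht => h1 t (by simp [ht]))
            (fun t ht => h2 t (by simp [ht])) hrest
          rw [hxy, this]


theorem pv_idxOf_of_drop : ∀ (cs : List Char) (k : Nat) {suf : List Char} {c : Char},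
    cs.drop k = c :: suf → c ∉ cs.take k → cs.idxOf c = k := by
  intro cs
  induction cs with
  | nil => intro k suf c hd; simp at hd
  | cons a t ih =>
    intro k suf c hd hnm
    cases k with
    | zero =>
      simp at hd
      simp [hd.1]
    | succ j =>
      simp only [List.drop_succ_cons] at hd
      simp only [List.take_succ_cons, List.mem_cons, not_or] at hnm
      have hne : a ≠ c := fun h => hnm.1 h.symm
      simp [hne, ih j hd hnm.2]

-- find on a single present character is its first index
theorem pv_find_go (c : Char) : ∀ (cs : List Char) (k : Nat), c ∈ cs →
    PySem.Chars.find.go [c] cs k = ((k + cs.idxOf c : Nat) : Int) := by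
  intro cs
  induction cs with
  | nil => intro k h; simp at h
  | cons a t ih =>
    intro k h
    by_cases hac : a = c
    · subst hac
      simp [PySem.Chars.find.go, List.isPrefixOf]
    · have hct : c ∈ t := by
        rcases List.mem_cons.mp h with h1 | h1
        · exact absurd h1.symm hac
        · exact h1
      have hpre : ([c].isPrefixOf (a :: t)) = false := by
        simp [List.isPrefixOf]
        exact fun h => absurd h.symm hac
      simp only [PySem.Chars.find.go, hpre, Bool.false_eq_true, if_false]
      rw [ih (k+1) hct]
      have : (a :: t).idxOf c = t.idxOf c + 1 := by simp [hac]
      rw [this]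
      push_cast
      ring

theorem pv_find_single {cs : List Char} {c : Char} (h : c ∈ cs) :
    PySem.Chars.find cs [c] = ((cs.idxOf c : Nat) : Int) := by
  have := pv_find_go c cs 0 h
  simpa [PySem.Chars.find] using this

theorem pv_loopA (cs : List Char) : ∀ (suf : List Char) (k : Nat)
    (d : PySem.Dict Char Int) (occ : List String),
    cs.drop k = suf → occ.length = cs.length →
    (∀ x : Char, d.get? x = if x ∈ cs.take k then some ((cs.idxOf x : Nat) : Int) else none) →
    ((PySem.List.enumerate suf (k : Int)).foldl pvStepA (d, occ)).2
      = occ.take k ++ suf.map (fun c => PySem.Int.toStr ((cs.idxOf c : Nat) : Int)) := by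
  intro suf
  induction suf with
  | nil =>
    intro k d occ hd hlen _
    have : occ.length ≤ k := by
      have := List.drop_eq_nil_iff.mp hd
      omega
    simp [PySem.List.enumerate, List.take_of_length_le this]
  | cons c suf' ih =>
    intro k d occ hd hlen hinv
    have hk : k < cs.length := by
      by_contra hk
      rw [List.drop_eq_nil_of_le (by omega)] at hd
      simp at hd
    have hd' : cs.drop (k+1) = suf' := by
      have := congrArg (List.drop 1) hd
      rw [List.drop_drop] at this
      simpa using this
    have htake : cs.take (k+1) = cs.take k ++ [c] := by
      rw [List.take_add, hd]
      simp
    set v : String := PySem.Int.toStr ((cs.idxOf c : Nat) : Int) with hv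
    -- the step's dict and its getD value
    have hstep : pvStepA (d, occ) ((k : Int), c)
        = (if d.contains c then d else d.insert c (k : Int),
           PySem.List.pySetD occ (k : Int) v) := by
      by_cases hmem : c ∈ cs.take k
      · have hg : d.get? c = some ((cs.idxOf c : Nat) : Int) := by rw [hinv c]; simp [hmem]
        have hc : d.contains c = true := by
          rw [PySem.Dict.contains_eq_isSome_get?, hg]; rfl
        simp [pvStepA, hc, PySem.Dict.getD, hg, hv]
      · have hg : d.get? c = none := by rw [hinv c]; simp [hmem]
        have hc : d.contains c = false := by
          rw [PySem.Dict.contains_eq_isSome_get?, hg]; rfl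
        have hidx : cs.idxOf c = k := pv_idxOf_of_drop cs k hd hmem
        simp [pvStepA, hc, PySem.Dict.getD, PySem.Dict.get?_insert_self, hv, hidx]
    have hinv' : ∀ x : Char,
        (if d.contains c then d else d.insert c (k : Int)).get? x
          = if x ∈ cs.take (k+1) then some ((cs.idxOf x : Nat) : Int) else none := by
      intro x
      by_cases hmem : c ∈ cs.take k
      · have hg : d.get? c = some ((cs.idxOf c : Nat) : Int) := by rw [hinv c]; simp [hmem]
        have hc : d.contains c = true := by
          rw [PySem.Dict.contains_eq_isSome_get?, hg]; rfl
        rw [if_pos hc, hinv x, htake]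
        by_cases hxc : x = c
        · subst hxc; simp [hmem]
        · simp [hxc]
      · have hg : d.get? c = none := by rw [hinv c]; simp [hmem]
        have hc : d.contains c = false := by
          rw [PySem.Dict.contains_eq_isSome_get?, hg]; rfl
        have hidx : cs.idxOf c = k := pv_idxOf_of_drop cs k hd hmem
        rw [if_neg (by simp [hc])]
        by_cases hxc : x = c
        · subst hxc
          rw [PySem.Dict.get?_insert_self, htake, if_pos (by simp), hidx]
        · rw [PySem.Dict.get?_insert_of_ne d _ hxc, hinv x, htake]
          simp [hxc]
    have hsetv : PySem.List.pySetD occ (k : Int) v = occ.set k v :=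
      PySem.List.pySetD_natCast occ k v
    have hkocc : k < occ.length := by omega
    have hocctake : (occ.set k v).take (k+1) = occ.take k ++ [v] := by
      rw [List.set_eq_take_cons_drop v hkocc, List.take_append]
      have hlt : (occ.take k).length = k := by simp; omega
      rw [hlt]
      simp [List.take_take]
    rw [PySem.List.enumerate_cons]
    have hcast : ((k : Int) + 1) = ((k+1 : Nat) : Int) := by push_cast; ring
    rw [List.foldl_cons, hstep, hsetv, hcast,
        ih (k+1) _ _ hd' (by simp; omega) hinv', hocctake]
    simp [hv]

def pvTok (n : Nat) : String := PySem.Int.toStr (n : Int)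

theorem pv_wordKey_eq (w : String) :
    pvWordKey w = PySem.Str.join " " ((pvFs w.toList).map pvTok) := by
  show PySem.Str.join " "
      (((PySem.List.enumerate w.toList ((0:Nat) : Int)).foldl pvStepA
        (PySem.Dict.empty, List.replicate w.toList.length "")).2)
    = _
  rw [pv_loopA w.toList w.toList 0 PySem.Dict.empty (List.replicate w.toList.length "")
        (by simp) (by simp) (by intro x; simp [PySem.Dict.get?_empty])]
  simp only [pvFs, List.map_map]
  rfl

theorem pv_key_eq_iff (u w : String) :
    pvWordKey u = pvWordKey w ↔ pvFs u.toList = pvFs w.toList := by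
  constructor
  · intro h
    rw [pv_wordKey_eq, pv_wordKey_eq] at h
    have h2 := congrArg String.toList h
    rw [PySem.Str.toList_join, PySem.Str.toList_join] at h2
    have htok : ∀ (l : List Nat),
        (l.map pvTok).map String.toList = l.map (fun n => Nat.toDigits 10 n) := by
      intro l
      rw [List.map_map]
      apply List.map_congr_left
      intro n _
      simp [Function.comp, pvTok, PySem.Int.toList_toStr, pv_toChars_natCast]
    rw [htok, htok] at h2
    have hside : ∀ (l : List Nat), ∀ t ∈ l.map (fun n => Nat.toDigits 10 n), t ≠ [] ∧ ' ' ∉ t := by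
      intro l t ht
      obtain ⟨n, _, rfl⟩ := List.mem_map.mp ht
      exact ⟨pv_toDigits_ne_nil n, pv_toDigits_no_space n⟩
    have h3 := pv_join_inj _ _ (hside _) (hside _) (by simpa using h2)
    have hinj : Function.Injective (fun n => Nat.toDigits 10 n) := fun a b => pv_toDigits_inj
    exact List.map_injective_iff.mpr hinj h3
  · intro h; rw [pv_wordKey_eq, pv_wordKey_eq, h]

theorem pv_pairOk_iff (u w : String) :
    pvPairOk u w = true ↔ pvFs u.toList = pvFs w.toList := by
  set a := u.toList
  set b := w.toList
  unfold pvPairOk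
  rw [Bool.and_eq_true, beq_iff_eq, List.all_eq_true]
  constructor
  · rintro ⟨hlen, hall⟩
    have hlen' : a.length = b.length := by
      simpa [PySem.Str.len] using hlen
    apply List.ext_getElem (by simp [pvFs, hlen'])
    intro i h1 h2
    have hia : i < a.length := by simpa [pvFs] using h1
    have hib : i < b.length := by simpa [pvFs] using h2
    have hz : (a[i], b[i]) ∈ a.zip b := by
      have : i < (a.zip b).length := by rw [List.length_zip]; omega
      have := List.getElem_mem this
      rwa [List.getElem_zip] at this
    have := hall _ hz
    rw [beq_iff_eq, pv_find_single (List.getElem_mem hia),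
        pv_find_single (List.getElem_mem hib)] at this
    simp only [pvFs, List.getElem_map]
    exact_mod_cast this
  · intro h
    have hlen' : a.length = b.length := by
      have := congrArg List.length h
      simpa [pvFs] using this
    refine ⟨by unfold PySem.Str.len; exact_mod_cast hlen', ?_⟩
    intro p hp
    obtain ⟨i, hi, hpi⟩ := List.mem_iff_getElem.mp hp
    have hia : i < a.length := List.lt_length_left_of_zip hi
    have hib : i < b.length := List.lt_length_right_of_zip hi
    rw [← hpi, List.getElem_zip]
    have hfs : a.idxOf a[i] = b.idxOf b[i] := by
      have h' := congrArg (fun l => l[i]?) h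
      simp only [pvFs, List.getElem?_map, List.getElem?_eq_getElem hia,
        List.getElem?_eq_getElem hib, Option.map_some] at h'
      exact Option.some.inj h'
    rw [beq_iff_eq, pv_find_single (List.getElem_mem hia),
        pv_find_single (List.getElem_mem hib), hfs]

theorem pv_setA (words : List String) :
    isIsomorphicWords words
      = decide (PySem.Set.len (PySem.Set.ofList (words.map pvWordKey)) ≤ 1) := by
  unfold isIsomorphicWords
  rw [← PySem.Set.update_map_eq_foldl_add, PySem.Set.update_empty]

theorem pv_len_ofList_le_one {l : List String} :
    PySem.Set.len (PySem.Set.ofList l) ≤ 1 ↔ ∀ x ∈ l, ∀ y ∈ l, x = y := by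
  have hnd := PySem.Set.nodup_ofList l
  have hmem := fun y => PySem.Set.mem_ofList l y
  constructor
  · intro h x hx y hy
    rcases hs : PySem.Set.ofList l with _ | ⟨a, t⟩
    · exact absurd ((hmem x).mpr hx) (by rw [hs]; simp)
    · cases t with
      | nil =>
        have hxa : x = a := by have := (hmem x).mpr hx; rw [hs] at this; simpa using this
        have hya : y = a := by have := (hmem y).mpr hy; rw [hs] at this; simpa using this
        rw [hxa, hya]
      | cons b t' =>
        exfalso
        rw [hs] at h
        simp [PySem.Set.len] at h
        omega
  · intro h
    rcases hs : PySem.Set.ofList l with _ | ⟨a, t⟩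
    · simp [PySem.Set.len]
    · cases t with
      | nil => simp [PySem.Set.len]
      | cons b t' =>
        exfalso
        have ha : a ∈ l := (hmem a).mp (by rw [hs]; simp)
        have hb : b ∈ l := (hmem b).mp (by rw [hs]; simp)
        have hab : a ≠ b := by
          rw [hs] at hnd
          simp [List.nodup_cons] at hnd
          exact hnd.1.1
        exact hab (h a ha b hb)

theorem pv_alt_cons (ref : String) (rest : List String) :
    isIsomorphicWords_alt (ref :: rest) = rest.all (fun w => pvPairOk ref w) := by
  cases rest with
  | nil => simp [isIsomorphicWords_alt]
  | cons b t =>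
    unfold isIsomorphicWords_alt
    rw [if_neg (by simp)]

theorem isIsomorphicWords_spec : Claim_equal_isIsomorphicWords := by
  intro words _
  unfold Spec_isIsomorphicWords
  rw [pv_setA]
  cases words with
  | nil => simp [isIsomorphicWords_alt, PySem.Set.len]
  | cons ref rest =>
    rw [pv_alt_cons]
    rw [Bool.eq_iff_iff]
    rw [decide_eq_true_iff, pv_len_ofList_le_one, List.all_eq_true]
    constructor
    · intro h w hw
      rw [pv_pairOk_iff, ← pv_key_eq_iff]
      exact h (pvWordKey ref) (by simp) (pvWordKey w) (by simp [List.mem_map]; exact Or.inr ⟨w, hw, rfl⟩)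
    · intro h x hx y hy
      have hkey : ∀ z ∈ ref :: rest, pvWordKey z = pvWordKey ref := by
        intro z hz
        rcases List.mem_cons.mp hz with rfl | hz'
        · rfl
        · have := h z hz'
          rw [pv_pairOk_iff, ← pv_key_eq_iff] at this
          exact this.symm
      obtain ⟨wx, hwx, rfl⟩ := List.mem_map.mp hx
      obtain ⟨wy, hwy, rfl⟩ := List.mem_map.mp hy
      rw [hkey wx hwx, hkey wy hwy]
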